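-- pv_equiv track=rewrite | github.com/jwster-dev/mkdbg | tools/triage_bundle.py | extract_snapshot_from_log_text
-- ===== SOURCE A (Python) =====
-- def normalize_text(text: str) -> str:
--     return text.replace("\r\n", "\n").replace("\r", "\n")
--
-- def extract_snapshot_from_log_text(text: str) -> str:
--     lines = normalize_text(text).splitlines()
--     begin_idx = -1
--     end_idx = -1
--     for i, line in enumerate(lines):
--         if "snapshot begin" in line:
--             begin_idx = i
--             break
--     if begin_idx >= 0:
--         for i in range(begin_idx, len(lines)):
--             if "snapshot end" in lines[i]:
--                 end_idx = i
--                 break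
--     if begin_idx >= 0 and end_idx >= begin_idx:
--         return "\n".join(lines[begin_idx : end_idx + 1])
--     filtered = [line for line in lines if line.strip().startswith("snapshot ")]
--     return "\n".join(filtered)
-- ===== SOURCE B (Python) =====
-- def extract_snapshot_from_log_text(text: str) -> str:
--     fallback = []
--     block = []
--     seen_begin = False
--     done = False
--     for line in text.replace("\r\n", "\n").replace("\r", "\n").splitlines():
--         if line.strip().startswith("snapshot "):
--             fallback.append(line)
--         if not seen_begin:
--             if "snapshot begin" in line:
--                 seen_begin = True
--                 block.append(line)
--                 if "snapshot end" in line: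
--                     done = True
--         elif not done:
--             block.append(line)
--             if "snapshot end" in line:
--                 done = True
--     return "\n".join(block if done else fallback)
-- ===== Notes on version B (the rewrite author's own statement) =====
-- stated objective: alternative
-- what changed: Replaces A's two separate index-based searches (find begin index, then rescan from it for the end index) plus a slice and a final filter comprehension by a single stateful pass over the lines that simultaneously accumulates the fallback list and the begin..end block.
import Mathlib
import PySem

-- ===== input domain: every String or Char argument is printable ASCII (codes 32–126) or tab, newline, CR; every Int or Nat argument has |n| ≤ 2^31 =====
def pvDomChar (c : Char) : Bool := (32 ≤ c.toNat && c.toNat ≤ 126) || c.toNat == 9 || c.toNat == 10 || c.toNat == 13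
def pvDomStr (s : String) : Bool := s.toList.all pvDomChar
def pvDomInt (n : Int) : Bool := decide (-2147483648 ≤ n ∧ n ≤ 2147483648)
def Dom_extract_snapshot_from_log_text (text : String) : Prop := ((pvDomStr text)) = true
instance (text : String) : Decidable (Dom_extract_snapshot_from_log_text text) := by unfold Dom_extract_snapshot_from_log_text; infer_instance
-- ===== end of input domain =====

-- B replaces A's two index-based marker searches + slice with a single stateful pass
-- over the lines (objective: alternative decomposition, one traversal).

-- shared transliterations of the three Python line tests, used by both ports
def hasBegin (l : String) : Bool := PySem.Str.isIn "snapshot begin" l    -- '"snapshot begin" in line'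
def hasEnd (l : String) : Bool := PySem.Str.isIn "snapshot end" l        -- '"snapshot end" in line'
def pLine (l : String) : Bool := PySem.Str.startswith (PySem.Str.strip l) "snapshot "  -- 'line.strip().startswith("snapshot ")'

-- ===== PORT A =====
def normalize_text (text : String) : String :=
  PySem.Str.replace (PySem.Str.replace text "\r\n" "\n") "\r" "\n"

-- A's first loop: 'for i, line in enumerate(lines): if "snapshot begin" in line: begin_idx = i; break'
def findBeginA : List String → Option Nat
  | [] => none
  | l :: ls => if hasBegin l then some 0 else (findBeginA ls).map (· + 1)

-- A's second loop: 'for i in range(begin_idx, len(lines)): if "snapshot end" in lines[i]: …'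
-- scanned as the suffix lines[begin_idx:], returning the offset (end_idx = begin_idx + offset)
def findEndA : List String → Option Nat
  | [] => none
  | l :: ls => if hasEnd l then some 0 else (findEndA ls).map (· + 1)

def extract_snapshot_from_log_text (text : String) : String :=
  let lines := PySem.Str.splitlines (normalize_text text)
  match findBeginA lines with
  | some b =>
    match findEndA (lines.drop b) with
    | some off =>
        PySem.Str.join "\n" (PySem.List.slice lines (some (b : Int)) (some ((b : Int) + ((off : Int) + 1))))
    | none => PySem.Str.join "\n" (lines.filter pLine)
  | none => PySem.Str.join "\n" (lines.filter pLine)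

-- ===== PORT B =====
-- B's single loop, state = (fallback, block, seen_begin, done)
def loopB : List String → List String → List String → Bool → Bool →
    List String × List String × Bool × Bool
  | [], fb, blk, sb, dn => (fb, blk, sb, dn)
  | l :: ls, fb, blk, sb, dn =>
    let fb' := if pLine l then fb ++ [l] else fb
    if !sb then
      if hasBegin l then loopB ls fb' (blk ++ [l]) true (hasEnd l)
      else loopB ls fb' blk sb dn
    else if !dn then loopB ls fb' (blk ++ [l]) sb (hasEnd l)
    else loopB ls fb' blk sb dn

def extract_snapshot_from_log_text_alt (text : String) : String :=
  let lines := PySem.Str.splitlines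
    (PySem.Str.replace (PySem.Str.replace text "\r\n" "\n") "\r" "\n")
  let st := loopB lines [] [] false false
  PySem.Str.join "\n" (if st.2.2.2 then st.2.1 else st.1)

-- ===== PRECONDITION & SPEC =====
def Spec_extract_snapshot_from_log_text (text : String) (out : String) : Prop := out = extract_snapshot_from_log_text_alt text
instance (text : String) (out : String) : Decidable (Spec_extract_snapshot_from_log_text text out) := by unfold Spec_extract_snapshot_from_log_text; infer_instance

-- ===== CLAIM (what is proved, stated in full; the proofs are below) =====
def Claim_equal_extract_snapshot_from_log_text : Prop := ∀ (text : String), Dom_extract_snapshot_from_log_text text → Spec_extract_snapshot_from_log_text text (extract_snapshot_from_log_text text)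

-- ===== LEMMAS AND PROOFS =====

lemma loopB_done : ∀ (ls fb blk : List String),
    loopB ls fb blk true true = (fb ++ ls.filter pLine, blk, true, true) := by
  intro ls
  induction ls with
  | nil => intro fb blk; simp [loopB]
  | cons l ls ih =>
    intro fb blk
    cases h : pLine l <;> simp [loopB, h, ih, List.filter_cons]

lemma loopB_seen : ∀ (ls fb blk : List String),
    loopB ls fb blk true false =
      match findEndA ls with
      | some off => (fb ++ ls.filter pLine, blk ++ ls.take (off + 1), true, true)
      | none => (fb ++ ls.filter pLine, blk ++ ls, true, false) := by
  intro ls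
  induction ls with
  | nil => intro fb blk; simp [loopB, findEndA]
  | cons l ls ih =>
    intro fb blk
    cases he : hasEnd l
    · cases h : pLine l <;>
        · simp only [loopB, h, he, if_true, if_false, Bool.not_true, Bool.not_false,
            ite_true, ite_false, cond_true, cond_false, findEndA, ih, List.filter_cons]
          cases hE : findEndA ls <;>
            simp [hE, h, List.take_succ_cons, List.append_assoc]
    · cases h : pLine l <;>
        simp [loopB, h, he, findEndA, loopB_done, List.filter_cons,
          List.take_succ_cons]

lemma loopB_main : ∀ (ls fb : List String),
    loopB ls fb [] false false =
      match findBeginA ls with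
      | none => (fb ++ ls.filter pLine, [], false, false)
      | some b =>
        match findEndA (ls.drop b) with
        | some off => (fb ++ ls.filter pLine, (ls.drop b).take (off + 1), true, true)
        | none => (fb ++ ls.filter pLine, ls.drop b, true, false) := by
  intro ls
  induction ls with
  | nil => intro fb; simp [loopB, findBeginA]
  | cons l ls ih =>
    intro fb
    cases hb : hasBegin l
    · cases h : pLine l <;>
        · simp only [loopB, h, hb, if_true, if_false, Bool.not_false, ite_true, ite_false,
            findBeginA, ih, List.filter_cons]
          cases hB : findBeginA ls
          · simp [hB, h]
          · rename_i b
            simp only [hB, Option.map_some, List.drop_succ_cons]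
            cases hE : findEndA (ls.drop b) <;> simp [hE, h]
    · cases he : hasEnd l
      · cases h : pLine l <;>
          · simp only [loopB, h, hb, he, if_true, if_false, Bool.not_false, ite_true, ite_false,
              findBeginA, findEndA, loopB_seen, List.filter_cons, List.drop_zero]
            cases hE : findEndA ls <;>
              simp [hE, h, List.take_succ_cons]
      · cases h : pLine l <;>
          simp [loopB, h, hb, he, findBeginA, findEndA, loopB_done, List.filter_cons,
            List.take_succ_cons]

-- ===== VERDICT (by name: the statement is the Claim_ definition above) =====
theorem extract_snapshot_from_log_text_spec : Claim_equal_extract_snapshot_from_log_text := by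
  intro text _
  unfold Spec_extract_snapshot_from_log_text
  unfold extract_snapshot_from_log_text extract_snapshot_from_log_text_alt normalize_text
  set ls := PySem.Str.splitlines
    (PySem.Str.replace (PySem.Str.replace text "\r\n" "\n") "\r" "\n") with hls
  clear_value ls
  simp only [loopB_main ls []]
  cases hB : findBeginA ls with
  | none => simp [hB]
  | some b =>
    simp only [hB]
    cases hE : findEndA (ls.drop b) with
    | none => simp [hE]
    | some off =>
      simp only [hE, List.nil_append]
      have : ((b : Int) + ((off : Int) + 1)) = ((b : Int) + ((off + 1 : Nat) : Int)) := by push_cast; ring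
      rw [this, PySem.List.slice_natCast_add]
      simp
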